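-- pv_equiv track=rewrite | github.com/yuj1818/TIL | codingtest/프로그래머스 숫자 게임.py | solution
-- ===== SOURCE A (Python) =====
-- import heapq
--
-- def solution(A, B):
--     A.sort(reverse=True)
--     heap = []
--     for b in B:
--         if b > A[-1]:
--             heapq.heappush(heap, -b)
--
--     ans = 0
--
--     for a in A:
--         if heap:
--             b = heapq.heappop(heap)
--             if -b > a:
--                 ans += 1
--             else:
--                 heapq.heappush(heap, b)
--
--     return ans
-- ===== SOURCE B (Python) =====
-- def solution(A, B):
--     # Two-pointer greedy over a sorted copy of B instead of a filtered max-heap.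
--     # A is sorted descending in place, exactly as the original does.
--     A.sort(reverse=True)
--     Bs = sorted(B, reverse=True)
--     ans = 0
--     i = 0
--     for a in A:
--         if i < len(Bs) and Bs[i] > a:
--             ans += 1
--             i += 1
--     return ans
-- ===== Notes on version B (the rewrite author's own statement) =====
-- stated objective: simpler
-- what changed: Replaces the filtered max-heap with repeated push/pop/push-back by a single two-pointer greedy pass over a descending-sorted copy of B.
-- crash fix: When A is empty and B is non-empty, A raises IndexError at A[-1]; B returns 0. — e.g. on solution([], [1]): A raises IndexError, B returns 0
import Mathlib
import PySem

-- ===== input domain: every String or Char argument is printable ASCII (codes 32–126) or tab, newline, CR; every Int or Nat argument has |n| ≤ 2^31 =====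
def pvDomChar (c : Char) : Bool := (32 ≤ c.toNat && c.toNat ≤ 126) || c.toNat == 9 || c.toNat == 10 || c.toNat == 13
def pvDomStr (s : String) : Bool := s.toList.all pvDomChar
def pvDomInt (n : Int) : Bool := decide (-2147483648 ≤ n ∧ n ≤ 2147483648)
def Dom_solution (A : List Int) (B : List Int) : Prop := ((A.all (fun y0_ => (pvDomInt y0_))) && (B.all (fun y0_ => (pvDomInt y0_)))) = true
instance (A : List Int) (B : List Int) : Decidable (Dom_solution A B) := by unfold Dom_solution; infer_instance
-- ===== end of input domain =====

-- B replaces A's filtered max-heap (push/pop/push-back) by a two-pointer greedy pass over a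
-- descending-sorted copy of B; the RETURN values agree, and both sort A descending in place.

-- ===== PORT A =====
-- heapq modeled as a sorted-ascending list (min at the head): heappush = ordered insert,
-- heappop = take the head.  Observationally exact: a heap of Ints is a multiset with pop-min.
def pvHeapPush (x : Int) : List Int → List Int
  | [] => [x]
  | y :: ys => if x ≤ y then x :: y :: ys else y :: pvHeapPush x ys

def solution (A : List Int) (B : List Int) : Int :=
  let As := PySem.List.sorted A (fun x => x) true        -- A.sort(reverse=True)
  let heap := B.foldl (fun h b =>
    match PySem.List.pyGet? As (-1) with                 -- A[-1]; none = IndexError, excluded by Pre_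
    | some last => if b > last then pvHeapPush (-b) h else h
    | none => h) []
  let st := As.foldl (fun (st : List Int × Int) a =>
    match st.1 with
    | [] => st                                           -- `if heap:` false
    | b :: rest =>                                       -- b = heappop(heap)
        if -b > a then (rest, st.2 + 1)
        else (pvHeapPush b rest, st.2)) (heap, 0)        -- heappush(heap, b)
  st.2

-- ===== PORT B =====
def solution_alt (A : List Int) (B : List Int) : Int :=
  let As := PySem.List.sorted A (fun x => x) true        -- A.sort(reverse=True)
  let Bs := PySem.List.sorted B (fun x => x) true        -- sorted(B, reverse=True)
  let st := As.foldl (fun (st : Int × Int) a =>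
    -- `i < len(Bs) and Bs[i] > a`: i is always ≥ 0, so pyGet? = none ↔ i ≥ len(Bs)
    match PySem.List.pyGet? Bs st.1 with
    | some b => if b > a then (st.1 + 1, st.2 + 1) else st
    | none => st) ((0 : Int), (0 : Int))
  st.2

-- ===== PRECONDITION & SPEC =====
-- Pre_ excludes exactly the inputs where A raises: A = [] with B ≠ [] (IndexError at A[-1]).
def Pre_solution (A : List Int) (B : List Int) : Prop := A ≠ [] ∨ B = []
instance (A : List Int) (B : List Int) : Decidable (Pre_solution A B) := by unfold Pre_solution; infer_instance
def pvWitness_solution : List Int × List Int := ([3, 1], [2, 5])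

-- When A is empty and B is non-empty, A raises IndexError at A[-1]; B returns 0.
def Raises_solution (A : List Int) (B : List Int) : Prop := A = [] ∧ B ≠ []
instance (A : List Int) (B : List Int) : Decidable (Raises_solution A B) := by unfold Raises_solution; infer_instance
def pvRaiseWitness_solution : List Int × List Int := ([], [1])
def pvRaiseWitnessOut_solution : Int := 0

def Spec_solution (A : List Int) (B : List Int) (out : Int) : Prop := out = solution_alt A B
instance (A : List Int) (B : List Int) (out : Int) : Decidable (Spec_solution A B out) := by unfold Spec_solution; infer_instance

-- ===== CLAIM (what is proved, stated in full; the proofs are below) =====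
def Claim_equal_solution : Prop := ∀ (A : List Int) (B : List Int), Dom_solution A B → Pre_solution A B → Spec_solution A B (solution A B)
def Claim_raises_solution : Prop := (∀ (A : List Int) (B : List Int), Dom_solution A B → Raises_solution A B → ¬ Pre_solution A B) ∧ (Dom_solution (pvRaiseWitness_solution.1) (pvRaiseWitness_solution.2) ∧ Raises_solution (pvRaiseWitness_solution.1) (pvRaiseWitness_solution.2) ∧ solution_alt (pvRaiseWitness_solution.1) (pvRaiseWitness_solution.2) = pvRaiseWitnessOut_solution)

-- ===== LEMMAS AND PROOFS =====

-- The common greedy count: as is scanned left to right, bs is the queue of remaining opponents.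
def gcount : List Int → List Int → Int
  | [], _ => 0
  | _ :: _, [] => 0
  | a :: as, b :: bs => if b > a then 1 + gcount as bs else gcount as (b :: bs)

lemma gcount_nil_right (as : List Int) : gcount as [] = 0 := by
  cases as <;> rfl

lemma pvHeapPush_of_le (x : Int) (h : List Int) (hx : ∀ y ∈ h, x ≤ y) :
    pvHeapPush x h = x :: h := by
  cases h with
  | nil => rfl
  | cons y ys => simp [pvHeapPush, hx y (by simp)]

lemma pvHeapPush_perm (x : Int) (h : List Int) : (pvHeapPush x h).Perm (x :: h) := by
  induction h with
  | nil => exact List.Perm.refl _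
  | cons y ys ih =>
    by_cases hxy : x ≤ y
    · simp [pvHeapPush, hxy]
    · simp only [pvHeapPush, hxy, if_false]
      exact (ih.cons y).trans (List.Perm.swap x y ys)

lemma pvHeapPush_pairwise (x : Int) (h : List Int) (hs : h.Pairwise (· ≤ ·)) :
    (pvHeapPush x h).Pairwise (· ≤ ·) := by
  induction h with
  | nil => simp [pvHeapPush]
  | cons y ys ih =>
    rcases List.pairwise_cons.mp hs with ⟨hy, hys⟩
    by_cases hxy : x ≤ y
    · simp only [pvHeapPush, if_pos hxy]
      refine List.pairwise_cons.mpr ⟨?_, hs⟩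
      intro z hz
      rcases List.mem_cons.mp hz with rfl | hz
      · exact hxy
      · exact le_trans hxy (hy z hz)
    · simp only [pvHeapPush, if_neg hxy]
      refine List.pairwise_cons.mpr ⟨?_, ih hys⟩
      intro z hz
      rcases List.mem_cons.mp ((pvHeapPush_perm x ys).mem_iff.mp hz) with rfl | hz
      · omega
      · exact hy z hz

-- A's scanning loop, on a sorted heap, computes gcount of the negated heap.
lemma foldA (as : List Int) (h : List Int) (acc : Int) (hs : h.Pairwise (· ≤ ·)) :
    (as.foldl (fun (st : List Int × Int) a =>
      match st.1 with
      | [] => st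
      | b :: rest => if -b > a then (rest, st.2 + 1) else (pvHeapPush b rest, st.2)) (h, acc)).2
    = acc + gcount as (h.map (fun x => -x)) := by
  induction as generalizing h acc with
  | nil => simp [gcount]
  | cons a as ih =>
    cases h with
    | nil => simp only [List.foldl_cons]; rw [ih [] acc (by simp)]; simp [gcount_nil_right]
    | cons b rest =>
      rcases List.pairwise_cons.mp hs with ⟨hb, hrest⟩
      simp only [List.foldl_cons, List.map_cons, gcount]
      by_cases hba : -b > a
      · rw [if_pos hba, if_pos hba, ih rest (acc + 1) hrest]; ring
      · rw [if_neg hba, if_neg hba, pvHeapPush_of_le b rest hb, ih (b :: rest) acc hs]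
        simp

-- B's pointer loop computes gcount of the not-yet-consumed suffix of Bs.
lemma foldB (as Bs : List Int) (i : Nat) (acc : Int) :
    (as.foldl (fun (st : Int × Int) a =>
      match PySem.List.pyGet? Bs st.1 with
      | some b => if b > a then (st.1 + 1, st.2 + 1) else st
      | none => st) (((i : Nat) : Int), acc)).2
    = acc + gcount as (Bs.drop i) := by
  induction as generalizing i acc with
  | nil => simp [gcount]
  | cons a as ih =>
    simp only [List.foldl_cons, PySem.List.pyGet?_natCast]
    cases hBi : Bs[i]? with
    | none =>
      have hlen : Bs.length ≤ i := by
        simpa using (List.getElem?_eq_none_iff).mp hBi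
      have hdrop : Bs.drop i = [] := List.drop_eq_nil_of_le hlen
      rw [hdrop, gcount_nil_right]
      have h1 := ih i acc
      rw [hdrop, gcount_nil_right] at h1
      simpa [hBi] using h1
    | some b =>
      have hi : i < Bs.length := (List.getElem?_eq_some_iff.mp hBi).1
      have hbv : Bs[i] = b := (List.getElem?_eq_some_iff.mp hBi).2
      have hdrop : Bs.drop i = b :: Bs.drop (i + 1) := by
        rw [List.drop_eq_getElem_cons hi, hbv]
      rw [hdrop]
      by_cases hba : b > a
      · have hcast : ((i : Nat) : Int) + 1 = (((i + 1 : Nat) : Nat) : Int) := by push_cast; ring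
        have h1 := ih (i + 1) (acc + 1)
        simp only [gcount, if_pos hba, hcast, h1]
        ring
      · have h1 := ih i acc
        rw [hdrop] at h1
        simp only [gcount, if_neg hba]
        exact h1

-- Content and order of A's heap after the filling loop.
lemma heapFill_perm (m : Int) (B : List Int) (h : List Int) :
    (B.foldl (fun h b => if b > m then pvHeapPush (-b) h else h) h).Perm
      (h ++ (B.filter (fun b => decide (b > m))).map (fun b => -b)) := by
  induction B generalizing h with
  | nil => simp
  | cons b B ih =>
    simp only [List.foldl_cons]
    by_cases hb : b > m
    · simp only [hb, if_true, List.filter_cons]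
      refine (ih (pvHeapPush (-b) h)).trans ?_
      refine (List.Perm.append_right _ (pvHeapPush_perm (-b) h)).trans ?_
      simpa using List.perm_middle.symm
    · rw [if_neg hb]
      have hfe : List.filter (fun b => decide (b > m)) (b :: B)
          = List.filter (fun b => decide (b > m)) B := by
        simp [hb]
      rw [hfe]
      exact ih h

lemma heapFill_pairwise (m : Int) (B : List Int) (h : List Int) (hs : h.Pairwise (· ≤ ·)) :
    (B.foldl (fun h b => if b > m then pvHeapPush (-b) h else h) h).Pairwise (· ≤ ·) := by
  induction B generalizing h with
  | nil => exact hs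
  | cons b B ih =>
    simp only [List.foldl_cons]
    by_cases hb : b > m
    · simp only [hb, if_true]; exact ih _ (pvHeapPush_pairwise _ _ hs)
    · simp only [hb, if_false]; exact ih _ hs

-- On a descending list, filtering (· > m) is a prefix and what is dropped is ≤ m.
lemma desc_filter_takeWhile (m : Int) (l : List Int) (hl : l.Pairwise (fun a b => b ≤ a)) :
    l.filter (fun b => decide (m < b)) = l.takeWhile (fun b => decide (m < b)) ∧
    ∀ x ∈ l.dropWhile (fun b => decide (m < b)), x ≤ m := by
  induction l with
  | nil => simp
  | cons b bs ih =>
    rcases List.pairwise_cons.mp hl with ⟨hb, hbs⟩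
    by_cases hmb : m < b
    · rcases ih hbs with ⟨h1, h2⟩
      constructor
      · simp [hmb, h1]
      · intro x hx
        rw [List.dropWhile_cons] at hx
        simp only [decide_eq_true hmb, if_true] at hx
        exact h2 x hx
    · constructor
      · have : ∀ x ∈ b :: bs, ¬ (m < x) := by
          intro x hx
          rcases List.mem_cons.mp hx with rfl | hx
          · exact hmb
          · have := hb x hx; omega
        rw [List.filter_eq_nil_iff.mpr (by intro x hx; simpa using this x hx), List.takeWhile_cons]
        simp [hmb]
      · intro x hx
        rw [List.dropWhile_cons] at hx
        simp only [decide_eq_false hmb] at hx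
        rcases List.mem_cons.mp hx with rfl | hx
        · omega
        · have := hb x hx
          omega

-- Opponents that beat nobody at the tail of the queue do not change the count.
lemma gcount_append_junk (as keep junk : List Int)
    (hj : ∀ x ∈ junk, ∀ a ∈ as, ¬ x > a) :
    gcount as (keep ++ junk) = gcount as keep := by
  induction as generalizing keep with
  | nil => simp [gcount]
  | cons a as ih =>
    have hj' : ∀ x ∈ junk, ∀ b ∈ as, ¬ x > b := by
      intro x hx b hb; exact hj x hx b (by simp [hb])
    cases keep with
    | nil =>
      simp only [List.nil_append, gcount_nil_right]
      cases junk with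
      | nil => simp [gcount_nil_right]
      | cons j js =>
        have hja : ¬ j > a := hj j (by simp) a (by simp)
        simp only [gcount, if_neg hja]
        have := ih []
        simp only [List.nil_append, gcount_nil_right] at this
        exact this (by intro x hx b hb; exact hj' x (by simp [hx]) b hb)
    | cons b bs =>
      simp only [List.cons_append, gcount]
      by_cases hba : b > a
      · rw [if_pos hba, if_pos hba, ih bs hj']
      · rw [if_neg hba, if_neg hba]
        have := ih (b :: bs) hj'
        simpa using this

-- The last element of a descending list bounds every element from below.
lemma desc_getLast_le (l : List Int) (hne : l ≠ []) (hl : l.Pairwise (fun a b => b ≤ a)) :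
    ∀ a ∈ l, l.getLast hne ≤ a := by
  induction l with
  | nil => cases hne rfl
  | cons b bs ih =>
    rcases List.pairwise_cons.mp hl with ⟨hb, hbs⟩
    intro a ha
    cases bs with
    | nil =>
      simp only [List.getLast_singleton]
      rcases List.mem_cons.mp ha with rfl | ha
      · exact le_refl _
      · simp at ha
    | cons c cs =>
      have hbsne : (c :: cs) ≠ [] := by simp
      rw [List.getLast_cons hbsne]
      rcases List.mem_cons.mp ha with rfl | ha
      · exact hb _ (List.getLast_mem hbsne)
      · exact ih hbsne hbs a ha

-- foldl of pointwise-equal step functions (used to discharge the constant A[-1] lookup).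
lemma foldl_fun_ext {α β : Type} (f g : β → α → β) (hfg : ∀ s a, f s a = g s a)
    (init : β) (l : List α) : l.foldl f init = l.foldl g init := by
  have h : f = g := funext fun s => funext fun a => hfg s a
  rw [h]

-- B's loop started at pointer 0.
lemma foldB0 (as Bs : List Int) :
    (as.foldl (fun (st : Int × Int) a =>
      match PySem.List.pyGet? Bs st.1 with
      | some b => if b > a then (st.1 + 1, st.2 + 1) else st
      | none => st) ((0 : Int), (0 : Int))).2 = gcount as Bs := by
  have h := foldB as Bs 0 0
  simpa using h

-- ===== VERDICT (by name: the statement is the Claim_ definition above) =====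
theorem solution_spec : Claim_equal_solution := by
  intro A B _ hpre
  unfold Spec_solution solution solution_alt
  dsimp only
  set As := PySem.List.sorted A (fun x => x) true with hAs
  set Bs := PySem.List.sorted B (fun x => x) true with hBs
  rw [foldB0 As Bs]
  rcases hB : B with _ | ⟨b0, Btl⟩
  · -- B = []: heap is empty, Bs is empty, both loops count nothing
    have hBsnil : Bs = [] := by rw [hBs, hB]; rfl
    simp only [List.foldl_nil]
    rw [foldA As [] 0 (by simp), hBsnil]
    simp [gcount_nil_right]
  · -- B ≠ []: by Pre_, A ≠ [], so A[-1] is the minimum of the descending As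
    have hAne : A ≠ [] := by
      rcases hpre with h | h
      · exact h
      · rw [hB] at h; cases h
    have hAsne : As ≠ [] := by
      intro hnil
      exact hAne ((PySem.List.sorted_eq_nil_iff _ _ _).mp (hAs ▸ hnil))
    rw [← hB]
    have hget : PySem.List.pyGet? As (-1) = some (As.getLast hAsne) := by
      rw [PySem.List.pyGet?_neg_one]
      exact List.getLast?_eq_some_getLast hAsne
    set m := As.getLast hAsne with hm
    have hheap :
        (B.foldl (fun h b => match PySem.List.pyGet? As (-1) with
          | some last => if b > last then pvHeapPush (-b) h else h
          | none => h) []) =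
        (B.foldl (fun h b => if b > m then pvHeapPush (-b) h else h) []) := by
      apply foldl_fun_ext
      intro h b
      rw [hget]
    rw [hheap]
    set heap := B.foldl (fun h b => if b > m then pvHeapPush (-b) h else h) [] with hheapdef
    have hheap_pair : heap.Pairwise (· ≤ ·) := heapFill_pairwise m B [] (by simp)
    rw [foldA As heap 0 hheap_pair]
    -- identify the negated heap with the kept prefix of Bs
    have hBsdesc : Bs.Pairwise (fun a b => b ≤ a) :=
      PySem.List.sorted_pairwise_rev B (fun x => x)
    have hKperm : ((Bs.filter (fun b => decide (b > m))).map (fun b => -b)).Perm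
        ((B.filter (fun b => decide (b > m))).map (fun b => -b)) :=
      ((PySem.List.sorted_perm B (fun x => x) true).filter _).map _
    have hKpair : ((Bs.filter (fun b => decide (b > m))).map (fun b => -b)).Pairwise (· ≤ ·) := by
      have hp := hBsdesc.filter (fun b => decide (b > m))
      exact (List.pairwise_map).mpr (hp.imp (by intro a b h; omega))
    have hperm : heap.Perm ((Bs.filter (fun b => decide (b > m))).map (fun b => -b)) := by
      refine (heapFill_perm m B []).trans ?_
      simpa using hKperm.symm
    have heq : heap = (Bs.filter (fun b => decide (b > m))).map (fun b => -b) :=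
      PySem.List.eq_of_perm_of_pairwise_le_of_injective (fun x => x) (fun a b h => h)
        hperm hheap_pair hKpair
    have hmapneg : heap.map (fun x => -x) = Bs.filter (fun b => decide (b > m)) := by
      rw [heq, List.map_map]
      simp
    rw [hmapneg]
    -- filter = takeWhile on the descending Bs; the dropped tail beats nobody in As
    rcases desc_filter_takeWhile m Bs hBsdesc with ⟨hft, hdw⟩
    have hjunk : ∀ x ∈ Bs.dropWhile (fun b => decide (m < b)), ∀ a ∈ As, ¬ x > a := by
      intro x hx a ha
      have hxm : x ≤ m := hdw x hx
      have hma : m ≤ a := desc_getLast_le As hAsne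
        (PySem.List.sorted_pairwise_rev A (fun x => x)) a ha
      omega
    have hfilter_eq : Bs.filter (fun b => decide (b > m)) = Bs.takeWhile (fun b => decide (m < b)) := by
      rw [← hft]
    have hsplit : Bs = Bs.takeWhile (fun b => decide (m < b)) ++ Bs.dropWhile (fun b => decide (m < b)) :=
      (List.takeWhile_append_dropWhile).symm
    rw [hfilter_eq]
    conv_rhs => rw [hsplit]
    rw [gcount_append_junk As _ _ hjunk]
    exact zero_add _

@[simp] theorem solution_raises : Claim_raises_solution := by
  unfold Claim_raises_solution
  constructor
  · intro A B _ hr hpre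
    rcases hr with ⟨hA, hB⟩
    rcases hpre with h | h
    · exact h hA
    · exact hB h
  · exact ⟨by decide, by decide, by decide⟩
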